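-- pv_equiv track=rewrite | github.com/a910230/root_h5_tools | b_jet_match.py | get_final_h_index
-- ===== SOURCE A (Python) =====
-- def get_final_h_index(pid, d1):
--     final_h_index = set()
--     for j in range(len(pid)):
--         if pid[j] == 25:
--             h = j
--             while d1[h] > h and pid[d1[h]] == 25:
--                 h = d1[h]
--             if pid[d1[h]] != 25:
--                 final_h_index.add(h)
--
--     return list(final_h_index)
-- ===== SOURCE B (Python) =====
-- def get_final_h_index(pid, d1):
--     n = len(pid)
--     # Right-to-left memoization: chains only move to strictly larger indices,
--     # so each Higgs position's chain endpoint is computed in O(1) from later ones.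
--     final = {}
--     for h in range(n - 1, -1, -1):
--         if pid[h] == 25:
--             nxt = d1[h]
--             final[h] = final[nxt] if h < nxt < n and pid[nxt] == 25 else h
--     out = set()
--     for j in range(n):
--         if pid[j] == 25:
--             e = final[j]
--             if pid[d1[e]] != 25:
--                 out.add(e)
--     return list(out)
-- ===== Notes on version B (the rewrite author's own statement) =====
-- stated objective: alternative
-- what changed: Replaces the per-index while-loop chain chase by a single right-to-left pass that memoizes each Higgs index's chain endpoint in a dict, then a lookup pass; asymptotically linear where A is quadratic on long chains, though not measurably faster on the generated inputs.
import Mathlib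
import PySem

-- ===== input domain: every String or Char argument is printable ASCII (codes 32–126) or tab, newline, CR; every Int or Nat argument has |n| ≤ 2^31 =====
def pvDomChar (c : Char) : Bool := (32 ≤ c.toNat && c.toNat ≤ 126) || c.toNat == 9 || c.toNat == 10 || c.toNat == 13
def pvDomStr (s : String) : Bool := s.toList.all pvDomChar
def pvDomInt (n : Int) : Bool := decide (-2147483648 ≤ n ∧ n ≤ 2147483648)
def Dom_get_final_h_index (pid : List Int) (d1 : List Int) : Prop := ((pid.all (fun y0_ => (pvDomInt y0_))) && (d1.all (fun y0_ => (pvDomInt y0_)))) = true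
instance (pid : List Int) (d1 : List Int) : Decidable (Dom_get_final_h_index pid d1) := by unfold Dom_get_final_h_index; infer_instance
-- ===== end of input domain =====

-- B replaces A's per-index while-loop chain chase by one right-to-left memoizing pass over a dict (an alternative traversal; neither version mutates its arguments).

-- ===== PORT A =====
-- needed by chaseA's decreasing_by: a value of 25 can only be read at an in-range index
theorem pv_val25_lt (pid : List Int) (i : Int)
    (hv : PySem.List.pyGetD pid i 0 = 25) : i < (pid.length : Int) := by
  by_contra hlt
  have hn : PySem.List.pyGet? pid i = none := by
    rw [PySem.List.pyGet?_eq_none_iff]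
    simp only [PySem.Raise.InRange]
    omega
  simp [PySem.List.pyGetD, hn] at hv

-- A's inner while loop: h = d1[h] while d1[h] > h and pid[d1[h]] == 25
def chaseA (pid d1 : List Int) (h : Int) : Int :=
  if hc : h < PySem.List.pyGetD d1 h 0 ∧ PySem.List.pyGetD pid (PySem.List.pyGetD d1 h 0) 0 = 25 then
    chaseA pid d1 (PySem.List.pyGetD d1 h 0)
  else h
termination_by ((pid.length : Int) - h).toNat
decreasing_by
  have h1 := pv_val25_lt pid _ hc.2
  omega

def get_final_h_index (pid : List Int) (d1 : List Int) : List Int :=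
  (PySem.List.pyRange 0 (pid.length : Int) 1).foldl (fun s j =>
    if PySem.List.pyGetD pid j 0 = 25 then
      let h := chaseA pid d1 j
      if PySem.List.pyGetD pid (PySem.List.pyGetD d1 h 0) 0 ≠ 25 then PySem.Set.add s h else s
    else s) PySem.Set.empty

-- ===== PORT B =====
def get_final_h_index_alt (pid : List Int) (d1 : List Int) : List Int :=
  let n : Int := (pid.length : Int)
  let final := (PySem.List.pyRange (n - 1) (-1) (-1)).foldl (fun f h =>
    if PySem.List.pyGetD pid h 0 = 25 then
      let nxt := PySem.List.pyGetD d1 h 0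
      f.insert h (if h < nxt ∧ nxt < n ∧ PySem.List.pyGetD pid nxt 0 = 25 then f.getD nxt nxt else h)
    else f) (PySem.Dict.empty : PySem.Dict Int Int)
  (PySem.List.pyRange 0 n 1).foldl (fun s j =>
    if PySem.List.pyGetD pid j 0 = 25 then
      let e := final.getD j j
      if PySem.List.pyGetD pid (PySem.List.pyGetD d1 e 0) 0 ≠ 25 then PySem.Set.add s e else s
    else s) PySem.Set.empty

-- ===== PRECONDITION & SPEC =====
-- Pre_ is exactly A's non-raising region: every Higgs position (pid[i] == 25) must be a valid
-- index into d1 whose d1-value is an in-range (possibly negative) index into pid; A's chain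
-- walk reads d1[h] and pid[d1[h]] exactly at such positions and raises IndexError otherwise.
def Pre_get_final_h_index (pid : List Int) (d1 : List Int) : Prop :=
  ∀ i : Nat, i < pid.length → pid.getD i 0 = 25 →
    i < d1.length ∧ -(pid.length : Int) ≤ d1.getD i 0 ∧ d1.getD i 0 < (pid.length : Int)
instance (pid : List Int) (d1 : List Int) : Decidable (Pre_get_final_h_index pid d1) := by
  unfold Pre_get_final_h_index; infer_instance

def pvWitness_get_final_h_index : List Int × List Int := ([25, 25, 1], [1, 2, 0])

def Spec_get_final_h_index (pid : List Int) (d1 : List Int) (out : List Int) : Prop := out = get_final_h_index_alt pid d1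
instance (pid : List Int) (d1 : List Int) (out : List Int) : Decidable (Spec_get_final_h_index pid d1 out) := by unfold Spec_get_final_h_index; infer_instance

-- ===== CLAIM (what is proved, stated in full; the proofs are below) =====
def Claim_equal_get_final_h_index : Prop := ∀ (pid : List Int) (d1 : List Int), Dom_get_final_h_index pid d1 → Pre_get_final_h_index pid d1 → Spec_get_final_h_index pid d1 (get_final_h_index pid d1)

-- ===== LEMMAS AND PROOFS =====

-- Invariant of B's right-to-left pass: after processing indices k-1 … 0, the dict maps every
-- Higgs position below pid.length to its chain endpoint chaseA (chains only move to strictly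
-- larger indices, so later entries are already present).
theorem pv_dict_inv (pid d1 : List Int) (k : Nat) (f0 : PySem.Dict Int Int)
    (h0 : ∀ i : Nat, k ≤ i → i < pid.length → PySem.List.pyGetD pid (i : Int) 0 = 25 →
      f0.get? (i : Int) = some (chaseA pid d1 (i : Int))) :
    ∀ i : Nat, i < pid.length → PySem.List.pyGetD pid (i : Int) 0 = 25 →
      ((PySem.List.pyRange ((k : Int) - 1) (-1) (-1)).foldl (fun f h =>
        if PySem.List.pyGetD pid h 0 = 25 then
          let nxt := PySem.List.pyGetD d1 h 0
          f.insert h (if h < nxt ∧ nxt < (pid.length : Int) ∧ PySem.List.pyGetD pid nxt 0 = 25 then f.getD nxt nxt else h)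
        else f) f0).get? (i : Int) = some (chaseA pid d1 (i : Int)) := by
  induction k generalizing f0 with
  | zero =>
    intro i hi h25
    rw [PySem.List.pyRange_neg_one_eq_nil (by omega)]
    exact h0 i (Nat.zero_le i) hi h25
  | succ k ih =>
    intro i hi h25
    rw [PySem.List.pyRange_neg_one_cons (by omega : (-1 : Int) < (k + 1 : Nat) - 1)]
    have hcast : ((k + 1 : Nat) : Int) - 1 = (k : Int) := by push_cast; ring
    rw [hcast]
    simp only [List.foldl_cons]
    refine ih _ ?_ i hi h25
    intro m hkm hm hm25
    by_cases hpk : PySem.List.pyGetD pid (k : Int) 0 = 25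
    · simp only [hpk, if_true]
      by_cases hmk : m = k
      · have hmkc : (m : Int) = (k : Int) := by exact_mod_cast hmk
        rw [hmkc, PySem.Dict.get?_insert_self]
        congr 1
        -- inserted value = chaseA at k
        rw [chaseA]
        by_cases hc : (k : Int) < PySem.List.pyGetD d1 (k : Int) 0 ∧
            PySem.List.pyGetD pid (PySem.List.pyGetD d1 (k : Int) 0) 0 = 25
        · have hlt := pv_val25_lt pid _ hc.2
          have hguard : (k : Int) < PySem.List.pyGetD d1 (k : Int) 0 ∧
              PySem.List.pyGetD d1 (k : Int) 0 < (pid.length : Int) ∧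
              PySem.List.pyGetD pid (PySem.List.pyGetD d1 (k : Int) 0) 0 = 25 :=
            ⟨hc.1, hlt, hc.2⟩
          rw [if_pos hguard, dif_pos hc]
          set nxt := PySem.List.pyGetD d1 (k : Int) 0 with hnxt
          have hnn : 0 ≤ nxt := le_of_lt (lt_of_le_of_lt (Int.natCast_nonneg k) hc.1)
          have hcast2 : ((nxt.toNat : Nat) : Int) = nxt := Int.toNat_of_nonneg hnn
          have h0n := h0 nxt.toNat (by omega) (by omega) (by rw [hcast2]; exact hc.2)
          rw [hcast2] at h0n
          rw [PySem.Dict.getD_eq_get?_getD, h0n]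
          rfl
        · rw [dif_neg hc]
          have hguard : ¬ ((k : Int) < PySem.List.pyGetD d1 (k : Int) 0 ∧
              PySem.List.pyGetD d1 (k : Int) 0 < (pid.length : Int) ∧
              PySem.List.pyGetD pid (PySem.List.pyGetD d1 (k : Int) 0) 0 = 25) := by
            intro h; exact hc ⟨h.1, h.2.2⟩
          rw [if_neg hguard]
      · have hne : (m : Int) ≠ (k : Int) := by exact_mod_cast hmk
        rw [PySem.Dict.get?_insert_of_ne _ _ hne]
        exact h0 m (by omega) hm hm25
    · simp only [hpk, if_false]
      by_cases hmk : m = k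
      · have hmkc : (m : Int) = (k : Int) := by exact_mod_cast hmk
        rw [hmkc] at hm25; exact absurd hm25 hpk
      · exact h0 m (by omega) hm hm25

-- On a valid index, the dict lookup in B's second pass is A's chain endpoint.
theorem pv_final_getD (pid d1 : List Int) (j : Int) (hj0 : 0 ≤ j) (hjn : j < (pid.length : Int))
    (h25 : PySem.List.pyGetD pid j 0 = 25) :
    ((PySem.List.pyRange ((pid.length : Int) - 1) (-1) (-1)).foldl (fun f h =>
        if PySem.List.pyGetD pid h 0 = 25 then
          let nxt := PySem.List.pyGetD d1 h 0
          f.insert h (if h < nxt ∧ nxt < (pid.length : Int) ∧ PySem.List.pyGetD pid nxt 0 = 25 then f.getD nxt nxt else h)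
        else f) (PySem.Dict.empty : PySem.Dict Int Int)).getD j j = chaseA pid d1 j := by
  have hcast : ((j.toNat : Nat) : Int) = j := Int.toNat_of_nonneg hj0
  have := pv_dict_inv pid d1 pid.length (PySem.Dict.empty : PySem.Dict Int Int)
    (by intro i hk hi _; omega) j.toNat (by omega) (by rw [hcast]; exact h25)
  rw [hcast] at this
  rw [PySem.Dict.getD_eq_get?_getD, this]
  rfl

-- ===== VERDICT (by name: the statement is the Claim_ definition above) =====
theorem get_final_h_index_spec : Claim_equal_get_final_h_index := by
  intro pid d1 _ _
  unfold Spec_get_final_h_index get_final_h_index get_final_h_index_alt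
  apply PySem.List.foldl_congr_mem
  intro s j hj
  have hmem := (PySem.List.mem_pyRange_one).1 hj
  by_cases h25 : PySem.List.pyGetD pid j 0 = 25
  · simp only [h25, if_true]
    rw [pv_final_getD pid d1 j hmem.1 hmem.2 h25]
  · simp only [h25, if_false]
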